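-- pv_equiv track=rewrite | github.com/viv670/Harmonics_Manas | backups/backup_20250918_205322_before_overlay/harmonic_patterns_qt.py | cleanupExtremums
-- ===== SOURCE A (Python) =====
-- def cleanupExtremums(extremums):
--     """
--     Clean up extremum points to ensure alternating high/low pattern.
--     When consecutive highs or lows are found, keep the most extreme one.
--     """
--     if len(extremums) <= 1:
--         return extremums
--
--     cleaned = []
--     i = 0
--
--     while i < len(extremums):
--         current = extremums[i]
--         cleaned.append(current)
--
--         # Look ahead for consecutive points of the same type
--         j = i + 1
--         while j < len(extremums) and extremums[j][2] == current[2]: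
--             # Same type (both highs or both lows)
--             if current[2]:  # Both are highs
--                 # Keep the higher high
--                 if extremums[j][1] > current[1]:
--                     cleaned[-1] = extremums[j]  # Replace with higher high
--                     current = extremums[j]
--             else:  # Both are lows
--                 # Keep the lower low
--                 if extremums[j][1] < current[1]:
--                     cleaned[-1] = extremums[j]  # Replace with lower low
--                     current = extremums[j]
--             j += 1
--
--         i = j  # Skip the consecutive points we just processed
--
--     return cleaned
-- ===== SOURCE B (Python) =====
-- def cleanupExtremums(extremums):
--     """Group-then-reduce: build maximal runs of same-type points in one pass,
--     then keep the most extreme point of each run (first one on ties)."""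
--     if len(extremums) <= 1:
--         return extremums
--
--     groups = []
--     for p in extremums:
--         if groups and groups[-1][0][2] == p[2]:
--             groups[-1].append(p)
--         else:
--             groups.append([p])
--
--     return [max(g, key=lambda q: q[1]) if g[0][2] else min(g, key=lambda q: q[1])
--             for g in groups]
-- ===== Notes on version B (the rewrite author's own statement) =====
-- stated objective: idiomatic
-- what changed: Replaced A's nested two-pointer index walking with a group-then-reduce decomposition: one pass partitions the list into maximal same-type runs, then each run is reduced with the builtin max/min (keyed by price, first extremal on ties).
import Mathlib
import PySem

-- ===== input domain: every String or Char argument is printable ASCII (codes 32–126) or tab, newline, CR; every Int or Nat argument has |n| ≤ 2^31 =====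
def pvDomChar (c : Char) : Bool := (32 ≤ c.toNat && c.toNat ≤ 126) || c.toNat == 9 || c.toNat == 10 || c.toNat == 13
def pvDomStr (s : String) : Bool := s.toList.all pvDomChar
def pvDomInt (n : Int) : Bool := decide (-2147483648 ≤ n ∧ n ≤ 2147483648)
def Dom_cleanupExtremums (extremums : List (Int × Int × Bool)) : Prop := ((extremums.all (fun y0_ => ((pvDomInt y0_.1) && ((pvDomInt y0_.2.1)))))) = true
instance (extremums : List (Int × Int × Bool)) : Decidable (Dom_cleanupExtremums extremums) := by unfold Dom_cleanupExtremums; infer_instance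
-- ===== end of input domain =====

-- B re-implements A as one-pass grouping into same-type runs followed by a max/min reduce per run (idiomatic; same cost).

-- ===== PORT A =====
-- inner 'while j < len and extremums[j][2] == current[2]' loop of A;
-- state = (cleaned, current, j); 'cleaned[-1] = e' is cleaned.dropLast ++ [e];
-- fuel only makes the loop total (it is always ≥ the remaining length, so it never cuts the loop short)
def pvAInner (xs : List (Int × Int × Bool)) :
    Nat → List (Int × Int × Bool) → (Int × Int × Bool) → Nat → List (Int × Int × Bool) × Nat
  | 0, cleaned, _, j => (cleaned, j)
  | fuel + 1, cleaned, cur, j =>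
    if j < xs.length then
      let e := xs.getD j (0, 0, false)
      if e.2.2 == cur.2.2 then
        if cur.2.2 then
          if e.2.1 > cur.2.1 then pvAInner xs fuel (cleaned.dropLast ++ [e]) e (j + 1)
          else pvAInner xs fuel cleaned cur (j + 1)
        else
          if e.2.1 < cur.2.1 then pvAInner xs fuel (cleaned.dropLast ++ [e]) e (j + 1)
          else pvAInner xs fuel cleaned cur (j + 1)
      else (cleaned, j)
    else (cleaned, j)

-- outer 'while i < len(extremums)' loop of A (fuel = one unit per iteration, again never binding)
def pvAOuter (xs : List (Int × Int × Bool)) :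
    Nat → List (Int × Int × Bool) → Nat → List (Int × Int × Bool)
  | 0, cleaned, _ => cleaned
  | fuel + 1, cleaned, i =>
    if i < xs.length then
      let cur := xs.getD i (0, 0, false)
      let r := pvAInner xs (xs.length - (i + 1)) (cleaned ++ [cur]) cur (i + 1)
      pvAOuter xs fuel r.1 r.2
    else cleaned

def cleanupExtremums (extremums : List (Int × Int × Bool)) : List (Int × Int × Bool) :=
  if extremums.length ≤ 1 then extremums
  else pvAOuter extremums extremums.length [] 0

-- ===== PORT B =====
-- Python's max(g, key=q[1]) / min(g, key=q[1]): first extremal element (strict improvement only)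
def pvMaxBy (cur : Int × Int × Bool) : List (Int × Int × Bool) → Int × Int × Bool
  | [] => cur
  | y :: ys => pvMaxBy (if y.2.1 > cur.2.1 then y else cur) ys

def pvMinBy (cur : Int × Int × Bool) : List (Int × Int × Bool) → Int × Int × Bool
  | [] => cur
  | y :: ys => pvMinBy (if y.2.1 < cur.2.1 then y else cur) ys

-- B's grouping loop body: append p to the last group if same type, else start a new group
def pvBStep (groups : List (List (Int × Int × Bool))) (p : Int × Int × Bool) :
    List (List (Int × Int × Bool)) :=
  match groups.getLast? with
  | some g =>
      if (g.headD (0, 0, false)).2.2 == p.2.2 then groups.dropLast ++ [g ++ [p]]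
      else groups ++ [[p]]
  | none => groups ++ [[p]]

-- B's final comprehension: reduce one group with max/min
def pvBRed (g : List (Int × Int × Bool)) : Int × Int × Bool :=
  match g with
  | [] => (0, 0, false)  -- unreachable: groups are nonempty
  | x :: ys => if x.2.2 then pvMaxBy x ys else pvMinBy x ys

def cleanupExtremums_alt (extremums : List (Int × Int × Bool)) : List (Int × Int × Bool) :=
  if extremums.length ≤ 1 then extremums
  else ((extremums.foldl pvBStep []).map pvBRed)

-- ===== PRECONDITION & SPEC =====
def Spec_cleanupExtremums (extremums : List (Int × Int × Bool)) (out : List (Int × Int × Bool)) : Prop := out = cleanupExtremums_alt extremums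
instance (extremums : List (Int × Int × Bool)) (out : List (Int × Int × Bool)) : Decidable (Spec_cleanupExtremums extremums out) := by unfold Spec_cleanupExtremums; infer_instance

-- ===== CLAIM (what is proved, stated in full; the proofs are below) =====
def Claim_equal_cleanupExtremums : Prop := ∀ (extremums : List (Int × Int × Bool)), Dom_cleanupExtremums extremums → Spec_cleanupExtremums extremums (cleanupExtremums extremums)

-- ===== LEMMAS AND PROOFS =====

-- reference grouping: maximal runs of equal type flag, by span recursion
def pvSpanGroups : List (Int × Int × Bool) → List (List (Int × Int × Bool))
  | [] => []
  | x :: rest =>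
      (x :: rest.takeWhile (fun q => q.2.2 == x.2.2)) ::
        pvSpanGroups (rest.dropWhile (fun q => q.2.2 == x.2.2))
termination_by xs => xs.length
decreasing_by simpa using Nat.lt_succ_of_le (List.length_dropWhile_le _ _)

theorem pvFoldl_bStep (xs : List (Int × Int × Bool)) :
    ∀ (gs : List (List (Int × Int × Bool))) (g : List (Int × Int × Bool)) (f : Bool),
      g ≠ [] → (g.headD (0, 0, false)).2.2 = f →
      xs.foldl pvBStep (gs ++ [g]) =
        gs ++ (g ++ xs.takeWhile (fun q => q.2.2 == f)) ::
          pvSpanGroups (xs.dropWhile (fun q => q.2.2 == f)) := by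
  induction xs with
  | nil => intro gs g f _ _; simp [pvSpanGroups]
  | cons x xs ih =>
    intro gs g f hg hf
    have hf' : (g.head?.getD (0, 0, false)).2.2 = f := by
      cases g with
      | nil => exact absurd rfl hg
      | cons a as => simpa using hf
    by_cases hx : x.2.2 = f
    · have hstep : pvBStep (gs ++ [g]) x = gs ++ [g ++ [x]] := by
        simp [pvBStep, hf', hx]
      simp only [List.foldl_cons, hstep]
      have := ih gs (g ++ [x]) f (by simp) (by cases g with
        | nil => exact absurd rfl hg
        | cons a as => simpa using hf)
      rw [this]
      simp [hx]
    · have hne : ((g.head?.getD (0, 0, false)).2.2 == x.2.2) = false := by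
        simp [hf']
        exact fun h => hx h.symm
      have hstep : pvBStep (gs ++ [g]) x = (gs ++ [g]) ++ [[x]] := by
        simp [pvBStep, hne]
      simp only [List.foldl_cons, hstep]
      have := ih (gs ++ [g]) [x] x.2.2 (by simp) (by simp)
      rw [this]
      simp [hx, pvSpanGroups]

theorem pvFoldl_bStep_nil (xs : List (Int × Int × Bool)) :
    xs.foldl pvBStep [] = pvSpanGroups xs := by
  cases xs with
  | nil => simp [pvSpanGroups]
  | cons x rest =>
    have hstep : pvBStep [] x = [] ++ [[x]] := by simp [pvBStep]
    simp only [List.foldl_cons, hstep]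
    rw [pvFoldl_bStep rest [] [x] x.2.2 (by simp) (by simp)]
    simp [pvSpanGroups]

-- A's inner loop computes the first-extremal reduce of the run starting at j
theorem pvAInner_eq (xs : List (Int × Int × Bool)) :
    ∀ (l : List (Int × Int × Bool)) (fuel j : Nat) (c : List (Int × Int × Bool))
      (cur : Int × Int × Bool), xs.drop j = l → l.length ≤ fuel →
      pvAInner xs fuel (c ++ [cur]) cur j =
        (c ++ [if cur.2.2 then pvMaxBy cur (l.takeWhile (fun q => q.2.2 == cur.2.2))
               else pvMinBy cur (l.takeWhile (fun q => q.2.2 == cur.2.2))],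
         j + (l.takeWhile (fun q => q.2.2 == cur.2.2)).length) := by
  intro l
  induction l with
  | nil =>
    intro fuel j c cur hd _
    have hj : ¬ j < xs.length := by
      have := List.drop_eq_nil_iff.mp hd; omega
    cases fuel with
    | zero => simp [pvAInner, pvMaxBy, pvMinBy]
    | succ fuel => simp [pvAInner, hj, pvMaxBy, pvMinBy]
  | cons e rest ih =>
    intro fuel j c cur hd hfuel
    cases fuel with
    | zero => simp at hfuel
    | succ fuel =>
    have hj : j < xs.length := by
      by_contra hc
      rw [List.drop_eq_nil_of_le (by omega)] at hd
      simp at hd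
    have hget : xs.getD j (0, 0, false) = e := by
      have h0 : (xs.drop j)[0]? = xs[j + 0]? := by rw [List.getElem?_drop]
      rw [hd] at h0
      simp at h0
      simp [List.getD, ← h0]
    have hrest : xs.drop (j + 1) = rest := by
      have h1 : (xs.drop j).drop 1 = xs.drop (j + 1) := by
        rw [List.drop_drop]
      rw [hd] at h1
      simpa using h1.symm
    have hfuel' : rest.length ≤ fuel := by simp at hfuel; omega
    rw [pvAInner]
    simp only [hj, if_true, hget]
    by_cases hsame : e.2.2 = cur.2.2
    · simp only [hsame, beq_self_eq_true, if_true]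
      by_cases hf : cur.2.2
      · simp only [hf, if_true]
        by_cases hgt : e.2.1 > cur.2.1
        · simp only [hgt, if_true, List.dropLast_concat]
          rw [ih fuel (j + 1) c e hrest hfuel']
          simp [hsame, hf, pvMaxBy, hgt]
          omega
        · simp only [hgt, if_false]
          rw [ih fuel (j + 1) c cur hrest hfuel']
          simp [hsame, hf, pvMaxBy, hgt]
          omega
      · simp only [hf, if_false]
        by_cases hlt : e.2.1 < cur.2.1
        · simp only [hlt, if_true, List.dropLast_concat]
          rw [ih fuel (j + 1) c e hrest hfuel']
          simp [hsame, hf, pvMinBy, hlt]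
          omega
        · simp only [hlt, if_false]
          rw [ih fuel (j + 1) c cur hrest hfuel']
          simp [hsame, hf, pvMinBy, hlt]
          omega
    · have hbeq : (e.2.2 == cur.2.2) = false := by simp [hsame]
      simp only [hbeq, if_false, List.takeWhile_cons, Bool.false_eq_true]
      split_ifs <;> simp [pvMaxBy, pvMinBy]

-- A's outer loop emits the reduced value of each run
theorem pvAOuter_eq (xs : List (Int × Int × Bool)) :
    ∀ (n : Nat) (l : List (Int × Int × Bool)) (fuel j : Nat) (c : List (Int × Int × Bool)),
      l.length ≤ n → xs.drop j = l → l.length ≤ fuel →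
      pvAOuter xs fuel c j = c ++ (pvSpanGroups l).map pvBRed := by
  intro n
  induction n with
  | zero =>
    intro l fuel j c hn hd _
    have hl : l = [] := List.eq_nil_of_length_eq_zero (by omega)
    subst hl
    have hj : ¬ j < xs.length := by
      have := List.drop_eq_nil_iff.mp hd; omega
    cases fuel with
    | zero => simp [pvAOuter, pvSpanGroups]
    | succ fuel => simp [pvAOuter, hj, pvSpanGroups]
  | succ n ih =>
    intro l fuel j c hn hd hfuel
    cases l with
    | nil =>
      have hj : ¬ j < xs.length := by
        have := List.drop_eq_nil_iff.mp hd; omega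
      cases fuel with
      | zero => simp [pvAOuter, pvSpanGroups]
      | succ fuel => simp [pvAOuter, hj, pvSpanGroups]
    | cons x rest =>
      cases fuel with
      | zero => simp at hfuel
      | succ fuel =>
      have hj : j < xs.length := by
        by_contra hc
        rw [List.drop_eq_nil_of_le (by omega)] at hd
        simp at hd
      have hget : xs.getD j (0, 0, false) = x := by
        have h0 : (xs.drop j)[0]? = xs[j + 0]? := by rw [List.getElem?_drop]
        rw [hd] at h0
        simp at h0
        simp [List.getD, ← h0]
      have hrest : xs.drop (j + 1) = rest := by
        have h1 : (xs.drop j).drop 1 = xs.drop (j + 1) := by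
          rw [List.drop_drop]
        rw [hd] at h1
        simpa using h1.symm
      have hrestlen : rest.length = xs.length - (j + 1) := by
        rw [← hrest, List.length_drop]
      rw [pvAOuter]
      simp only [hj, if_true, hget]
      rw [pvAInner_eq xs rest (xs.length - (j + 1)) (j + 1) c x hrest (by omega)]
      set run := rest.takeWhile (fun q => q.2.2 == x.2.2) with hrun
      have hdrop2 : xs.drop (j + 1 + run.length) = rest.dropWhile (fun q => q.2.2 == x.2.2) := by
        have h2 : (xs.drop (j + 1)).drop run.length = xs.drop (j + 1 + run.length) := by
          rw [List.drop_drop]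
        rw [hrest] at h2
        rw [← h2]
        conv_lhs => rw [← List.takeWhile_append_dropWhile (p := fun q => q.2.2 == x.2.2) (l := rest)]
        rw [← hrun, List.drop_left]
      have hdlen : (rest.dropWhile (fun q => q.2.2 == x.2.2)).length ≤ rest.length :=
        List.length_dropWhile_le _ _
      have hlen : (rest.dropWhile (fun q => q.2.2 == x.2.2)).length ≤ n := by
        simp at hn
        omega
      rw [ih (rest.dropWhile (fun q => q.2.2 == x.2.2)) fuel (j + 1 + run.length)
            (c ++ [if x.2.2 then pvMaxBy x run else pvMinBy x run]) hlen hdrop2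
            (by simp at hfuel; omega)]
      rw [pvSpanGroups]
      simp [pvBRed, ← hrun]

-- ===== VERDICT (by name: the statement is the Claim_ definition above) =====
theorem cleanupExtremums_spec : Claim_equal_cleanupExtremums := by
  intro xs _
  unfold Spec_cleanupExtremums cleanupExtremums cleanupExtremums_alt
  by_cases h : xs.length ≤ 1
  · simp [h]
  · simp only [h, if_false]
    rw [pvFoldl_bStep_nil, pvAOuter_eq xs xs.length xs xs.length 0 [] (le_refl _) (by simp) (le_refl _)]
    simp
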